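-- pv_equiv track=rewrite | github.com/pd-giz-dave/fellsafe-python | source/experiments/experiments.py | _get_slope
-- ===== SOURCE A (Python) =====
-- def _get_slope(sequence, threshold=0):
--     """ given a list of values that represent some sort of sequence determine their slope,
--         None values are ignored
--         """
--
--     max_coord = len(sequence)
--     delta_threshold = threshold * threshold  # square it to remove sign consideration
--
--     slope = [0 for _ in range(max_coord)]
--     curr = None
--     prev = None
--     for x in range(len(sequence)):
--         if curr is not None:
--             prev = curr
--         curr = sequence[x]
--         if curr is None or prev is None:
--             continue
--         delta = curr - prev
--         if (delta * delta) > delta_threshold: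
--             slope[x] = delta
--
--     return slope
-- ===== SOURCE B (Python) =====
-- def _get_slope(sequence, threshold=0):
--     """Stateless per-index computation: each slope entry is derived independently
--     by scanning backwards for the nearest earlier non-None value (no carried state)."""
--     dt = threshold * threshold
--
--     def at(i):
--         v = sequence[i]
--         if v is None:
--             return 0
--         for j in range(i - 1, -1, -1):
--             w = sequence[j]
--             if w is not None:
--                 d = v - w
--                 return d if d * d > dt else 0
--         return 0
--
--     return [at(i) for i in range(len(sequence))]
-- ===== Notes on version B (the rewrite author's own statement) =====
-- stated objective: alternative
-- what changed: Replaces A's stateful single forward pass carrying the last non-None value with a stateless per-index computation: each output entry is computed independently by a backward scan for the nearest earlier non-None value.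
import Mathlib
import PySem

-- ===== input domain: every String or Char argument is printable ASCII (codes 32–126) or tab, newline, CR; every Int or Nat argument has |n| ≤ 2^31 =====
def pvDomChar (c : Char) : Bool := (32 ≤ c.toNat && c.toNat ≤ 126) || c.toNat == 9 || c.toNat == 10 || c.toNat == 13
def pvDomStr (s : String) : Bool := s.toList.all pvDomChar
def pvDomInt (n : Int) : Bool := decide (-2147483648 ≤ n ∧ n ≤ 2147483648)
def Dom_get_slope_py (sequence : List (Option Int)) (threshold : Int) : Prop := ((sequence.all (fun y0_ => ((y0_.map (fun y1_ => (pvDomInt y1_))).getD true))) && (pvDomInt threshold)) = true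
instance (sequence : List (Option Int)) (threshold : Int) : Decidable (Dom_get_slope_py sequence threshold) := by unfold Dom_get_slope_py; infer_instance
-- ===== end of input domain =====

-- B replaces A's stateful single forward pass (carrying the last non-None value) with a
-- stateless per-index computation: each entry is found independently by a backward scan
-- for the nearest earlier non-None value (objective: alternative decomposition).

-- ===== PORT A =====
-- loop body of A's `for x in range(len(sequence))`; state is (slope, curr, prev)
def pvStepA (sequence : List (Option Int)) (delta_threshold : Int)
    (st : List Int × Option Int × Option Int) (x : Int) :
    List Int × Option Int × Option Int :=
  let prev := if st.2.1.isSome then st.2.1 else st.2.2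
  -- sequence[x]: x is always in range here, so `pyGet?` is `some`; `.getD none` only totalizes
  let curr : Option Int := (PySem.List.pyGet? sequence x).getD none
  match curr, prev with
  | some c, some p =>
      let delta := c - p
      if delta * delta > delta_threshold then (st.1.set x.toNat delta, curr, prev)
      else (st.1, curr, prev)
  | _, _ => (st.1, curr, prev)

def get_slope_py (sequence : List (Option Int)) (threshold : Int) : List Int :=
  let max_coord := sequence.length
  let delta_threshold := threshold * threshold
  ((PySem.List.pyRange 0 (max_coord : Int) 1).foldl (pvStepA sequence delta_threshold)
    (List.replicate max_coord 0, none, none)).1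

-- ===== PORT B =====
-- B's inner `for j in range(i - 1, -1, -1)` with its early returns: look at indices
-- j-1, j-2, …, 0 for the nearest earlier non-None value
def pvScanB (sequence : List (Option Int)) (dt v : Int) : Nat → Int
  | 0 => 0
  | j + 1 =>
    match (sequence[j]?).getD none with
    | some w => if (v - w) * (v - w) > dt then v - w else 0
    | none => pvScanB sequence dt v j

-- B's helper `at(i)`
def pvAtB (sequence : List (Option Int)) (dt : Int) (i : Nat) : Int :=
  match (sequence[i]?).getD none with
  | none => 0
  | some v => pvScanB sequence dt v i

def get_slope_py_alt (sequence : List (Option Int)) (threshold : Int) : List Int :=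
  (List.range sequence.length).map (pvAtB sequence (threshold * threshold))

-- ===== PRECONDITION & SPEC =====
def Spec_get_slope_py (sequence : List (Option Int)) (threshold : Int) (out : List Int) : Prop := out = get_slope_py_alt sequence threshold
instance (sequence : List (Option Int)) (threshold : Int) (out : List Int) : Decidable (Spec_get_slope_py sequence threshold out) := by unfold Spec_get_slope_py; infer_instance

-- ===== CLAIM (what is proved, stated in full; the proofs are below) =====
def Claim_equal_get_slope_py : Prop := ∀ (sequence : List (Option Int)) (threshold : Int), Dom_get_slope_py sequence threshold → Spec_get_slope_py sequence threshold (get_slope_py sequence threshold)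

-- ===== LEMMAS AND PROOFS =====

-- A's full loop state and B's full result, as named abbreviations for the proofs
def pvSA (sequence : List (Option Int)) (dt : Int) : List Int × Option Int × Option Int :=
  (PySem.List.pyRange 0 (sequence.length : Int) 1).foldl (pvStepA sequence dt)
    (List.replicate sequence.length 0, none, none)

def pvB (sequence : List (Option Int)) (dt : Int) : List Int :=
  (List.range sequence.length).map (pvAtB sequence dt)

-- the last non-None value of the sequence
def pvLastNN (seq : List (Option Int)) : Option Int := (seq.filterMap id).getLast?

lemma pvLastNN_snoc (seq : List (Option Int)) (c : Option Int) :
    pvLastNN (seq ++ [c]) = match c with | some v => some v | none => pvLastNN seq := by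
  unfold pvLastNN
  cases c <;> simp

lemma pvLenA (seq : List (Option Int)) (dt : Int) (L : List Int) :
    ∀ st : List Int × Option Int × Option Int,
      (L.foldl (pvStepA seq dt) st).1.length = st.1.length := by
  induction L with
  | nil => intro st; rfl
  | cons x L ih =>
    intro st
    simp only [List.foldl_cons]
    rw [ih]
    unfold pvStepA
    cases (PySem.List.pyGet? seq x).getD none <;>
      cases (if st.2.1.isSome then st.2.1 else st.2.2) <;>
        (simp; try (split <;> simp))

-- A's loop on seq ++ [c], run over indices < seq.length, ignores the extra slot
lemma pvExtA (seq : List (Option Int)) (c : Option Int) (dt : Int) :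
    ∀ (L : List Int) (s : List Int) (cur prv : Option Int),
      s.length = seq.length → (∀ x ∈ L, 0 ≤ x ∧ x < (seq.length : Int)) →
      L.foldl (pvStepA (seq ++ [c]) dt) (s ++ [0], cur, prv) =
        ((L.foldl (pvStepA seq dt) (s, cur, prv)).1 ++ [0],
         (L.foldl (pvStepA seq dt) (s, cur, prv)).2) := by
  intro L
  induction L with
  | nil => intro s cur prv _ _; rfl
  | cons x L ih =>
    intro s cur prv hs hL
    obtain ⟨hx0, hx1⟩ := hL x (List.mem_cons_self ..)
    have hget : PySem.List.pyGet? (seq ++ [c]) x = PySem.List.pyGet? seq x := by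
      rw [PySem.List.pyGet?_of_nonneg _ hx0, PySem.List.pyGet?_of_nonneg _ hx0,
        List.getElem?_append_left (by omega)]
    simp only [List.foldl_cons]
    have hstep : pvStepA (seq ++ [c]) dt (s ++ [0], cur, prv) x =
        ((pvStepA seq dt (s, cur, prv) x).1 ++ [0], (pvStepA seq dt (s, cur, prv) x).2) := by
      unfold pvStepA
      rw [hget]
      cases (PySem.List.pyGet? seq x).getD none <;>
        cases (if cur.isSome then cur else prv) <;> simp
      split <;>
        simp [List.set_append_left _ _ (by omega : x.toNat < s.length)]
    rw [hstep]
    have := ih (pvStepA seq dt (s, cur, prv) x).1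
      (pvStepA seq dt (s, cur, prv) x).2.1 (pvStepA seq dt (s, cur, prv) x).2.2
      (by
        unfold pvStepA
        cases (PySem.List.pyGet? seq x).getD none <;>
          cases (if cur.isSome then cur else prv) <;> simp [hs]
        split <;> simp [hs])
      (fun y hy => hL y (List.mem_cons_of_mem _ hy))
    simpa using this

lemma pvSetLast (l : List Int) (n : Nat) (h : l.length = n) (d : Int) :
    (l ++ [0]).set n d = l ++ [d] := by
  subst h; simp

-- the backward scan only looks at indices below its counter
lemma pvScan_restrict (seq : List (Option Int)) (c : Option Int) (dt v : Int) :
    ∀ j, j ≤ seq.length → pvScanB (seq ++ [c]) dt v j = pvScanB seq dt v j := by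
  intro j
  induction j with
  | zero => intro _; rfl
  | succ j ih =>
    intro hj
    unfold pvScanB
    rw [List.getElem?_append_left (by omega)]
    cases (seq[j]?).getD none with
    | some w => rfl
    | none => exact ih (by omega)

lemma pvAt_restrict (seq : List (Option Int)) (c : Option Int) (dt : Int) (i : Nat)
    (hi : i < seq.length) :
    pvAtB (seq ++ [c]) dt i = pvAtB seq dt i := by
  unfold pvAtB
  rw [List.getElem?_append_left hi]
  cases (seq[i]?).getD none with
  | none => rfl
  | some v => exact pvScan_restrict seq c dt v i (by omega)

-- a full backward scan finds exactly the last non-None value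
lemma pvScan_full (dt v : Int) (seq : List (Option Int)) :
    pvScanB seq dt v seq.length =
      match pvLastNN seq with
      | some p => if (v - p) * (v - p) > dt then v - p else 0
      | none => 0 := by
  induction seq using List.reverseRecOn with
  | nil => rfl
  | append_singleton seq c ih =>
    have hlen : (seq ++ [c]).length = seq.length + 1 := by simp
    rw [hlen]
    unfold pvScanB
    rw [List.getElem?_concat_length]
    cases c with
    | some w => rw [pvLastNN_snoc]; rfl
    | none =>
      rw [pvLastNN_snoc]
      show pvScanB (seq ++ [none]) dt v seq.length = _
      rw [pvScan_restrict seq none dt v seq.length (le_refl _), ih]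

-- B's result on seq ++ [c]: old entries unchanged, one new entry at the end
lemma pvB_snoc (seq : List (Option Int)) (c : Option Int) (dt : Int) :
    pvB (seq ++ [c]) dt = pvB seq dt ++ [pvAtB (seq ++ [c]) dt seq.length] := by
  unfold pvB
  have hlen : (seq ++ [c]).length = seq.length + 1 := by simp
  rw [hlen, List.range_succ, List.map_append, List.map_singleton]
  congr 1
  exact List.map_congr_left (fun i hi =>
    pvAt_restrict seq c dt i (List.mem_range.1 hi))

-- the simultaneous invariant, by induction on the sequence from the back
lemma pvMain (dt : Int) (seq : List (Option Int)) :
    (pvSA seq dt).1 = pvB seq dt ∧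
    (pvSA seq dt).2.1 = seq.getLast?.getD none ∧
    (if (pvSA seq dt).2.1.isSome then (pvSA seq dt).2.1 else (pvSA seq dt).2.2) =
      pvLastNN seq := by
  induction seq using List.reverseRecOn with
  | nil => exact ⟨rfl, rfl, rfl⟩
  | append_singleton seq c ih =>
    obtain ⟨ih1, ih2, ih3⟩ := ih
    have hlen : ((seq ++ [c]).length : Int) = (seq.length : Int) + 1 := by simp
    have hrange : PySem.List.pyRange 0 ((seq ++ [c]).length : Int) 1 =
        PySem.List.pyRange 0 (seq.length : Int) 1 ++ [(seq.length : Int)] := by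
      rw [hlen]
      exact PySem.List.pyRange_one_succ_right (by positivity)
    have hrep : List.replicate (seq ++ [c]).length (0 : Int) =
        List.replicate seq.length 0 ++ [0] := by
      simp [List.replicate_succ']
    have hSAlen : (pvSA seq dt).1.length = seq.length := by
      unfold pvSA; rw [pvLenA]; simp
    have hget : PySem.List.pyGet? (seq ++ [c]) (seq.length : Int) = some c :=
      PySem.List.pyGet?_append_length seq [] c
    -- A's fold on seq ++ [c] = A's fold on seq (in the widened slope) then one step at n
    have hA : pvSA (seq ++ [c]) dt =
        pvStepA (seq ++ [c]) dt ((pvSA seq dt).1 ++ [0], (pvSA seq dt).2) (seq.length : Int) := by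
      unfold pvSA
      rw [hrange, List.foldl_append, hrep]
      rw [pvExtA seq c dt _ _ _ _ (by simp)
        (fun x hx => by
          have := (PySem.List.mem_pyRange_one (a := 0) (b := (seq.length : Int)) (x := x)).1 hx
          omega)]
      simp only [List.foldl_cons, List.foldl_nil]
    have hB := pvB_snoc seq c dt
    cases c with
    | none =>
      -- A takes the `continue` branch; B's new entry is 0 since sequence[n] is None
      have hAtB : pvAtB (seq ++ [none]) dt seq.length = 0 := by
        unfold pvAtB
        rw [List.getElem?_concat_length]
        rfl
      have hAstep : pvSA (seq ++ [none]) dt =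
          ((pvSA seq dt).1 ++ [0], none,
            (if (pvSA seq dt).2.1.isSome then (pvSA seq dt).2.1 else (pvSA seq dt).2.2)) := by
        rw [hA]
        unfold pvStepA
        simp only [hget]
        cases (if (pvSA seq dt).2.1.isSome then (pvSA seq dt).2.1 else (pvSA seq dt).2.2) <;>
          simp
      rw [hAstep, hB, hAtB]
      refine ⟨by simp [ih1], by simp, ?_⟩
      simp [pvLastNN_snoc, ih3]
    | some v =>
      -- B's new entry is the backward scan, i.e. the comparison with the last non-None of seq
      have hAtB : pvAtB (seq ++ [some v]) dt seq.length =
          match pvLastNN seq with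
          | some p => if (v - p) * (v - p) > dt then v - p else 0
          | none => 0 := by
        unfold pvAtB
        rw [List.getElem?_concat_length]
        simp only [Option.getD_some]
        rw [pvScan_restrict seq (some v) dt v seq.length (le_refl _), pvScan_full]
      cases hlast : pvLastNN seq with
      | none =>
        have hprev :
            (if (pvSA seq dt).2.1.isSome then (pvSA seq dt).2.1 else (pvSA seq dt).2.2) = none := by
          rw [ih3, hlast]
        have hAstep : pvSA (seq ++ [some v]) dt = ((pvSA seq dt).1 ++ [0], some v, none) := by
          rw [hA]
          unfold pvStepA
          simp only [hget, hprev]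
          simp
        rw [hAstep, hB, hAtB, hlast]
        refine ⟨by simp [ih1], by simp, ?_⟩
        simp [pvLastNN_snoc]
      | some p =>
        have hprev :
            (if (pvSA seq dt).2.1.isSome then (pvSA seq dt).2.1 else (pvSA seq dt).2.2) =
              some p := by
          rw [ih3, hlast]
        have hAstep : pvSA (seq ++ [some v]) dt =
            (if (v - p) * (v - p) > dt
              then (pvSA seq dt).1 ++ [v - p] else (pvSA seq dt).1 ++ [0],
             some v, some p) := by
          rw [hA]
          unfold pvStepA
          simp only [hget, hprev]
          simp only [Option.getD_some]
          split
          · rw [Int.toNat_natCast, pvSetLast _ _ hSAlen]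
          · rfl
        rw [hAstep, hB, hAtB, hlast]
        refine ⟨?_, by simp, by simp [pvLastNN_snoc]⟩
        dsimp only
        split <;> simp [ih1]

-- ===== VERDICT (by name: the statement is the Claim_ definition above) =====
theorem get_slope_py_spec : Claim_equal_get_slope_py := by
  intro sequence threshold _
  show get_slope_py sequence threshold = get_slope_py_alt sequence threshold
  exact (pvMain (threshold * threshold) sequence).1
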